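-- pv_equiv track=rewrite | github.com/gsravank/ds_algo | problems/leetcode/contests/weekly_271/p4.py | getMinGreaterThan
-- ===== SOURCE A (Python) =====
-- def getMinGreaterThan(positions, value):
--     n = len(positions)
--     if value < positions[0]:
--         return 0, 0
--     elif value == positions[0]:
--         return 0, 1
--     elif value == positions[n - 1]:
--         return n - 1, 1
--     elif value > positions[n - 1]:
--         return n, 0
--
--     low = 0
--     high = n - 1
--     answer = 0
--
--     while low <= high:
--         mid = low + int((high - low) / 2)
--         if positions[mid] >= value:
--             high = mid - 1
--             answer = mid
--         else:
--             low = mid + 1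
--
--     return answer, 1 if positions[answer] == value else 0
-- ===== SOURCE B (Python) =====
-- def getMinGreaterThan(positions, value):
--     n = len(positions)
--     if value < positions[0]:
--         return 0, 0
--     elif value == positions[0]:
--         return 0, 1
--     elif value == positions[n - 1]:
--         return n - 1, 1
--     elif value > positions[n - 1]:
--         return n, 0
--
--     answer = 0
--     for i, p in enumerate(positions):
--         if p >= value:
--             answer = i
--             break
--     return answer, 1 if positions[answer] == value else 0
-- ===== Notes on version B (the rewrite author's own statement) =====
-- stated objective: simpler
-- what changed: Replaces the manual binary-search loop (low/high/mid bookkeeping) with a single forward linear scan that stops at the first element >= value; the four top guard clauses are kept.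
-- outside the precondition, e.g. on getMinGreaterThan([0, 9, 0, 0, 10], 5): A returns (4, 0), B returns (1, 0); on getMinGreaterThan([], 1): A raises IndexError, B raises IndexError
import Mathlib
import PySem

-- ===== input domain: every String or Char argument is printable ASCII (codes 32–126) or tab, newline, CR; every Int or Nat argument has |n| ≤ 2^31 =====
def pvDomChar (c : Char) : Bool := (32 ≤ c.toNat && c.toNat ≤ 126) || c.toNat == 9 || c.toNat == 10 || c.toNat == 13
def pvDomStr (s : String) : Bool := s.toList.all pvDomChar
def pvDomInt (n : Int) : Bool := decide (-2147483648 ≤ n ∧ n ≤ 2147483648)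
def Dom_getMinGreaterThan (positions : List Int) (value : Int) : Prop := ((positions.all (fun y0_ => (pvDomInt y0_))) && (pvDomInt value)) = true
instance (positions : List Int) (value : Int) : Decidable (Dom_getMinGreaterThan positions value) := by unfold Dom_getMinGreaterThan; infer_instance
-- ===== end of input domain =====

-- B replaces A's manual binary-search loop by a single forward linear scan (simpler; not faster).

-- ===== PORT A =====
-- positions[i] for an index that is in range in every reachable state (Pre_ excludes the
-- empty list, on which Python's positions[0] raises IndexError); getD 0 is never the raising case inside Pre_.
def pvIdx (positions : List Int) (i : Int) : Int := (PySem.List.pyGet? positions i).getD 0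

-- the 'while low <= high' loop of A, step for step (mid = low + int((high-low)/2); high-low ≥ 0 so
-- Python's truncating int(…/2) equals Int floor division by 2); the Nat fuel only makes the
-- recursion structural: fuel n+1 exceeds the iteration count (high+1-low shrinks every turn)
def loopA : Nat → (Int → Int) → Int → Int → Int → Int → Int
  | 0, _, _, _, _, answer => answer
  | fuel + 1, p, value, low, high, answer =>
    if low ≤ high then
      let mid := low + (high - low) / 2
      if p mid ≥ value then loopA fuel p value low (mid - 1) mid
      else loopA fuel p value (mid + 1) high answer
    else answer

def getMinGreaterThan (positions : List Int) (value : Int) : Int × Int :=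
  let n : Int := positions.length
  if value < pvIdx positions 0 then (0, 0)
  else if value = pvIdx positions 0 then (0, 1)
  else if value = pvIdx positions (n - 1) then (n - 1, 1)
  else if value > pvIdx positions (n - 1) then (n, 0)
  else
    let answer := loopA (positions.length + 1) (pvIdx positions) value 0 (n - 1) 0
    (answer, if pvIdx positions answer = value then 1 else 0)

-- ===== PORT B =====
-- the 'for i, p in enumerate(positions): if p >= value: answer = i; break' loop of B
def scanB (value : Int) (i : Int) : List Int → Int
  | [] => 0
  | x :: xs => if x ≥ value then i else scanB value (i + 1) xs

def getMinGreaterThan_alt (positions : List Int) (value : Int) : Int × Int :=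
  let n : Int := positions.length
  if value < pvIdx positions 0 then (0, 0)
  else if value = pvIdx positions 0 then (0, 1)
  else if value = pvIdx positions (n - 1) then (n - 1, 1)
  else if value > pvIdx positions (n - 1) then (n, 0)
  else
    let answer := scanB value 0 positions
    (answer, if pvIdx positions answer = value then 1 else 0)

-- ===== PRECONDITION & SPEC =====
-- Pre_ excludes the empty list (Python's positions[0] raises IndexError) and the unsorted lists
-- whose value falls strictly between the first and last element: there A's binary search assumes
-- sorted input and its answer is an accident of the probe order, which no caller of this LeetCode
-- helper would specify.  Unsorted inputs resolved by the four guard clauses stay admitted.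
def Pre_getMinGreaterThan (positions : List Int) (value : Int) : Prop :=
  positions ≠ [] ∧
    (List.Pairwise (· ≤ ·) positions ∨
      value < pvIdx positions 0 ∨ value = pvIdx positions 0 ∨
      value = pvIdx positions ((positions.length : Int) - 1) ∨
      value > pvIdx positions ((positions.length : Int) - 1))
instance (positions : List Int) (value : Int) : Decidable (Pre_getMinGreaterThan positions value) := by unfold Pre_getMinGreaterThan; infer_instance
def pvWitness_getMinGreaterThan : List Int × Int := ([0, 2], 1)

def Spec_getMinGreaterThan (positions : List Int) (value : Int) (out : Int × Int) : Prop := out = getMinGreaterThan_alt positions value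
instance (positions : List Int) (value : Int) (out : Int × Int) : Decidable (Spec_getMinGreaterThan positions value out) := by unfold Spec_getMinGreaterThan; infer_instance

-- ===== CLAIM (what is proved, stated in full; the proofs are below) =====
def Claim_equal_getMinGreaterThan : Prop := ∀ (positions : List Int) (value : Int), Dom_getMinGreaterThan positions value → Pre_getMinGreaterThan positions value → Spec_getMinGreaterThan positions value (getMinGreaterThan positions value)

-- ===== LEMMAS AND PROOFS =====

-- sorted list: the indexing function is monotone on in-range indices
theorem pvIdx_mono (positions : List Int) (hs : List.Pairwise (· ≤ ·) positions) :
    ∀ i j : Int, 0 ≤ i → i ≤ j → j < (positions.length : Int) →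
      pvIdx positions i ≤ pvIdx positions j := by
  intro i j hi hij hj
  have hi' : i < (positions.length : Int) := lt_of_le_of_lt hij hj
  rw [pvIdx, pvIdx, PySem.List.pyGet?_of_nonneg positions hi, PySem.List.pyGet?_of_nonneg positions (le_trans hi hij)]
  have hiN : i.toNat < positions.length := by omega
  have hjN : j.toNat < positions.length := by omega
  rw [List.getElem?_eq_getElem hiN, List.getElem?_eq_getElem hjN]
  simp only [Option.getD_some]
  rcases eq_or_lt_of_le (show i.toNat ≤ j.toNat by omega) with h | h
  · simp [h]
  · exact List.pairwise_iff_getElem.mp hs i.toNat j.toNat hiN hjN h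

-- A's loop returns the least index r with p r ≥ value, given the loop invariant
theorem loopA_first (p : Int → Int) (value nn : Int)
    (hlast : value ≤ p (nn - 1)) (hn : 1 ≤ nn)
    (hmono : ∀ i j : Int, 0 ≤ i → i ≤ j → j ≤ nn - 1 → p i ≤ p j) :
    ∀ (k : Nat) (low high answer : Int), (high + 1 - low).toNat < k →
      0 ≤ low → low ≤ high + 1 → high ≤ nn - 1 →
      (∀ i, 0 ≤ i → i < low → p i < value) →
      ((answer = high + 1 ∧ value ≤ p answer ∧ answer ≤ nn - 1) ∨ (answer = 0 ∧ high = nn - 1)) →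
      0 ≤ loopA k p value low high answer ∧ loopA k p value low high answer ≤ nn - 1 ∧
        value ≤ p (loopA k p value low high answer) ∧
        (∀ i, 0 ≤ i → i < loopA k p value low high answer → p i < value) := by
  intro k
  induction k with
  | zero => intro low high answer hk; omega
  | succ k ih =>
    intro low high answer hk h0 h1 h2 hlt hinv
    rw [loopA]
    by_cases hlh : low ≤ high
    · rw [if_pos hlh]
      set mid := low + (high - low) / 2 with hmid
      have hmlo : low ≤ mid := by omega
      have hmhi : mid ≤ high := by omega
      by_cases hpm : p mid ≥ value
      · rw [if_pos hpm]
        exact ih low (mid - 1) mid (by omega) h0 (by omega) (by omega)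
          hlt (Or.inl ⟨by omega, hpm, by omega⟩)
      · rw [if_neg hpm]
        refine ih (mid + 1) high answer (by omega) (by omega)
          (by omega) h2 ?_ ?_
        · intro i hi hilt
          by_cases hil : i < low
          · exact hlt i hi hil
          · exact lt_of_le_of_lt (hmono i mid hi (by omega) (by omega)) (by omega)
        · rcases hinv with h | h
          · exact Or.inl h
          · exact Or.inr h
    · rw [if_neg hlh]
      rcases hinv with ⟨ha, hpv, hle⟩ | ⟨ha, hh⟩
      · have : answer = low := by omega
        exact ⟨by omega, hle, hpv, by rw [this]; exact hlt⟩
      · exfalso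
        have : low = nn := by omega
        have := hlt (nn - 1) (by omega) (by omega)
        omega

-- B's scan returns r when everything before r is < value and position r is ≥ value
theorem scanB_eq (value : Int) :
    ∀ (xs : List Int) (k r : Int), 0 ≤ k → k ≤ r → r - k < (xs.length : Int) →
      (∀ j : Nat, (hj : j < xs.length) →
        (k + (j : Int) < r → xs[j] < value) ∧ (k + (j : Int) = r → value ≤ xs[j])) →
      scanB value k xs = r := by
  intro xs
  induction xs with
  | nil =>
    intro k r h1 h2 h3 _
    simp only [List.length_nil, Nat.cast_zero] at h3
    omega
  | cons x t ih =>
    intro k r h1 h2 h3 h4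
    have h0 := h4 0 (by simp)
    simp only [Nat.cast_zero, add_zero, List.getElem_cons_zero] at h0
    rw [scanB]
    by_cases hx : x ≥ value
    · rw [if_pos hx]
      by_contra hne
      have hkr : k < r := by omega
      exact absurd (h0.1 hkr) (by omega)
    · rw [if_neg hx]
      have hkr : k ≠ r := fun h => hx (h0.2 h)
      refine ih (k + 1) r (by omega) (by omega) (by simp at h3 ⊢; omega) ?_
      intro j hj
      have := h4 (j + 1) (by simpa using Nat.succ_lt_succ hj)
      simp only [List.getElem_cons_succ] at this
      constructor
      · intro hlt; exact this.1 (by push_cast at this ⊢; omega)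
      · intro heq; exact this.2 (by push_cast at this ⊢; omega)

-- ===== VERDICT (by name: the statement is the Claim_ definition above) =====
theorem getMinGreaterThan_spec : Claim_equal_getMinGreaterThan := by
  intro positions value _ hpre
  obtain ⟨hne, hd⟩ := hpre
  unfold Spec_getMinGreaterThan getMinGreaterThan getMinGreaterThan_alt
  simp only []
  set n : Int := (positions.length : Int) with hn
  have hn1 : 1 ≤ n := by
    have : positions.length ≠ 0 := fun h => hne (List.eq_nil_of_length_eq_zero h)
    omega
  by_cases h1 : value < pvIdx positions 0
  · simp [h1]
  by_cases h2 : value = pvIdx positions 0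
  · simp [h1, h2]
  by_cases h3 : value = pvIdx positions (n - 1)
  · simp [h1, h2, h3]
  by_cases h4 : value > pvIdx positions (n - 1)
  · simp [h1, h2, h3, h4]
  simp only [if_neg h1, if_neg h2, if_neg h3, if_neg h4]
  have hs : List.Pairwise (· ≤ ·) positions := by
    rcases hd with hs | hg | hg | hg | hg
    · exact hs
    · exact absurd hg h1
    · exact absurd hg h2
    · exact absurd hg h3
    · exact absurd hg h4
  have hmono := pvIdx_mono positions hs
  have hlast : value ≤ pvIdx positions (n - 1) := by omega
  have hfirst : loopA (positions.length + 1) (pvIdx positions) value 0 (n - 1) 0 = scanB value 0 positions := by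
    have hL := loopA_first (pvIdx positions) value n hlast hn1
      (fun i j hi hij hj => hmono i j hi hij (by omega))
      (positions.length + 1) 0 (n - 1) 0 (by omega) (by omega) (by omega) (by omega)
      (fun i hi hlt => absurd hlt (by omega)) (Or.inr ⟨rfl, rfl⟩)
    obtain ⟨hr0, hrn, hrv, hrlt⟩ := hL
    set r := loopA (positions.length + 1) (pvIdx positions) value 0 (n - 1) 0 with hrdef
    refine (scanB_eq value positions 0 r (by omega) hr0 (by omega) ?_).symm
    intro j hj
    have hidx : pvIdx positions (j : Int) = positions[j] := by
      rw [pvIdx, PySem.List.pyGet?_of_nonneg positions (by positivity)]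
      simp [List.getElem?_eq_getElem hj]
    constructor
    · intro hlt
      have := hrlt (j : Int) (by positivity) (by omega)
      omega
    · intro heq
      have : pvIdx positions (j : Int) = pvIdx positions r := by rw [show ((j : Int)) = r by omega]
      omega
  rw [hfirst]
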